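-- pv_equiv track=rewrite | github.com/georgebzhang/Python_LeetCode | Add_Two_Numbers/add_two_numbers.py | value_to_array
-- ===== SOURCE A (Python) =====
-- def value_to_array(val):
--     arr = []
--     while True:
--         arr.append(val % 10)
--         val = val // 10
--         if val == 0:
--             break
--     return arr
-- ===== SOURCE B (Python) =====
-- def value_to_array(val):
--     return [int(c) for c in reversed(str(val))]
-- ===== Notes on version B (the rewrite author's own statement) =====
-- stated objective: idiomatic
-- what changed: B replaces the arithmetic peel-off loop (% 10 and // 10 with an accumulator) by converting the value to its decimal string once and mapping int over the reversed characters.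
import Mathlib
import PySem

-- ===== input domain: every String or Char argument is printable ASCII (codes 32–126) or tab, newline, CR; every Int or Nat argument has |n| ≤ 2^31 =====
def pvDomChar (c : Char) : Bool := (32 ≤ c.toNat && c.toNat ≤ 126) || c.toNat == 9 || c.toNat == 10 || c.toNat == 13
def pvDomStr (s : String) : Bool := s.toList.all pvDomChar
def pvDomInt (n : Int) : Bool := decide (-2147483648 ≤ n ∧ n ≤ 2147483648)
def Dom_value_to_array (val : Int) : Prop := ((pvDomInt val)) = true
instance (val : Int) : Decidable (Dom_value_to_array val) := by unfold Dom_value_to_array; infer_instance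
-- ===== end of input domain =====

-- B converts the value to its decimal string and maps int over the reversed characters,
-- instead of A's arithmetic peel-off loop; equivalence is claimed for 0 ≤ val.

-- ===== PORT A =====
-- Python's 'while True' loop: append val % 10, val //= 10, stop when val == 0.
-- Fuel val.natAbs + 1 is enough iterations for every val ≥ 0 (val shrinks by // 10
-- each round); for val < 0 the Python loop never terminates (excluded by Pre_).
def valueToArrayLoop : Nat → Int → List Int → List Int
  | 0, _, arr => arr
  | fuel+1, val, arr =>
    let arr' := arr ++ [PySem.Int.mod val 10]
    let val' := PySem.Int.floordiv val 10
    if val' = 0 then arr' else valueToArrayLoop fuel val' arr'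

def value_to_array (val : Int) : List Int :=
  valueToArrayLoop (val.natAbs + 1) val []

-- ===== PORT B =====
-- [int(c) for c in reversed(str(val))]; int(c) on a decimal-digit character c is
-- its code point minus 48 — exact here since under Pre_ (0 ≤ val) str(val) consists
-- of digit characters only.
def value_to_array_alt (val : Int) : List Int :=
  ((PySem.Int.toStr val).toList.reverse).map (fun c => ((c.toNat : Int) - 48))

-- ===== PRECONDITION & SPEC =====
-- Pre_ excludes negative val: there A's loop never returns (val // 10 stays negative).
def Pre_value_to_array (val : Int) : Prop := 0 ≤ val
instance (val : Int) : Decidable (Pre_value_to_array val) := by unfold Pre_value_to_array; infer_instance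
def pvWitness_value_to_array : Int := (305)

def Spec_value_to_array (val : Int) (out : List Int) : Prop := out = value_to_array_alt val
instance (val : Int) (out : List Int) : Decidable (Spec_value_to_array val out) := by unfold Spec_value_to_array; infer_instance

-- ===== CLAIM (what is proved, stated in full; the proofs are below) =====
def Claim_equal_value_to_array : Prop := ∀ (val : Int), Dom_value_to_array val → Pre_value_to_array val → Spec_value_to_array val (value_to_array val)

-- ===== LEMMAS AND PROOFS =====

theorem digitChar_sub48 (d : Nat) (h : d < 10) :
    (((Nat.digitChar d).toNat : Int) - 48) = (d : Int) := by
  interval_cases d <;> decide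

theorem toDigitsCore_append (b : Nat) :
    ∀ (f n : Nat) (ds : List Char),
      Nat.toDigitsCore b f n ds = Nat.toDigitsCore b f n [] ++ ds := by
  intro f
  induction f with
  | zero => intro n ds; simp [Nat.toDigitsCore]
  | succ m ih =>
    intro n ds
    simp only [Nat.toDigitsCore]
    split
    · rfl
    · rw [ih (n / b) (Nat.digitChar (n % b) :: ds),
          ih (n / b) [Nat.digitChar (n % b)], List.append_assoc]
      rfl

theorem loop_eq_toDigitsCore :
    ∀ (fuel n : Nat) (arr : List Int), n < fuel →
      valueToArrayLoop fuel (n : Int) arr =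
        arr ++ ((Nat.toDigitsCore 10 fuel n []).map
                  (fun c => ((c.toNat : Int) - 48))).reverse := by
  intro fuel
  induction fuel with
  | zero => intro n arr h; omega
  | succ m ih =>
    intro n arr _h
    have hmod : PySem.Int.mod (n : Int) 10 = ((n % 10 : Nat) : Int) := by
      rw [PySem.Int.mod_eq_emod_of_pos (b := 10) (by norm_num)]
      push_cast; ring
    have hdiv : PySem.Int.floordiv (n : Int) 10 = ((n / 10 : Nat) : Int) := by
      rw [PySem.Int.floordiv_eq_ediv_of_pos (b := 10) (by norm_num)]
      exact_mod_cast (Int.natCast_div n 10).symm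
    simp only [valueToArrayLoop, hmod, hdiv, Nat.toDigitsCore]
    by_cases hz : n / 10 = 0
    · simp [hz, digitChar_sub48 (n % 10) (by omega)]
    · have hzi : ((n / 10 : Nat) : Int) ≠ 0 := by exact_mod_cast hz
      have hnpos : 0 < n := by
        rcases Nat.eq_zero_or_pos n with h0 | h0
        · exact absurd (by simp [h0]) hz
        · exact h0
      have hlt : n / 10 < m := by
        have := Nat.div_lt_self hnpos (by norm_num : (1:Nat) < 10)
        omega
      simp only [if_neg hzi, if_neg hz]
      rw [ih (n / 10) _ hlt,
          toDigitsCore_append 10 m (n / 10) [Nat.digitChar (n % 10)]]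
      simp [digitChar_sub48 (n % 10) (by omega), List.append_assoc]

-- ===== VERDICT (by name: the statement is the Claim_ definition above) =====
theorem value_to_array_spec : Claim_equal_value_to_array := by
  intro val _hd hpre
  unfold Spec_value_to_array value_to_array value_to_array_alt
  obtain ⟨n, rfl⟩ : ∃ n : Nat, val = (n : Int) := ⟨val.toNat, (Int.toNat_of_nonneg hpre).symm⟩
  have hchars : (PySem.Int.toStr (n : Int)).toList = Nat.toDigits 10 n := by
    rw [PySem.Int.toList_toStr]
    simp [PySem.Int.toChars, not_lt.mpr (Int.natCast_nonneg n)]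
  rw [hchars, List.map_reverse, ← List.map_reverse]
  have hfuel : Int.natAbs (n : Int) + 1 = n + 1 := by simp
  rw [hfuel]
  simpa [Nat.toDigits] using loop_eq_toDigitsCore (n + 1) n [] (by omega)
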